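-- pv_equiv track=rewrite | github.com/Mrabdel-dev/automat | PdsLast.py | tubeRound
-- ===== SOURCE A (Python) =====
-- def tubeRound(num):
--     T = 1
--     for i in range(0, num):
--         x = (i % 12) + 1
--         if x % 12 == 0:
--             if T == 96:
--                 T = 1
--             else:
--                 T += 1
--     return T
-- ===== SOURCE B (Python) =====
-- def tubeRound(num):
--     # closed form: the counter increments once per 12 iterations and cycles mod 96
--     return max(0, num) // 12 % 96 + 1
-- ===== Notes on version B (the rewrite author's own statement) =====
-- stated objective: faster
-- what changed: replaces the O(num) simulation loop by a closed-form: count the increments (num//12) and reduce modulo the 96-value cycle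
import Mathlib
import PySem

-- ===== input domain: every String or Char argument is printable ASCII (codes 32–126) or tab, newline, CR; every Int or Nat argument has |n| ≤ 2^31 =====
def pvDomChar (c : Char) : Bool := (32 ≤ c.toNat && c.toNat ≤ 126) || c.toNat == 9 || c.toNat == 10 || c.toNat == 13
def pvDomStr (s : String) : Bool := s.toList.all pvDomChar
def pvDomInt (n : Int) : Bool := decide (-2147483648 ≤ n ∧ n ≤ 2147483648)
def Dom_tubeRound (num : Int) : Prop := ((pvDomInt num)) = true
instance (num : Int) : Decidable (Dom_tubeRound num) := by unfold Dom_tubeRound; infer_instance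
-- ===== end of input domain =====

-- B replaces A's O(num) simulation loop by a closed-form modulo computation (O(1)).


-- ===== PORT A =====
-- loop body of A: x = (i % 12) + 1; if x % 12 == 0: T wraps 96→1 else T += 1
def tubeRoundStep (T : Int) (i : Int) : Int :=
  let x := PySem.Int.mod i 12 + 1
  if PySem.Int.mod x 12 = 0 then (if T = 96 then 1 else T + 1) else T

def tubeRound (num : Int) : Int :=
  (PySem.List.pyRange 0 num 1).foldl tubeRoundStep 1

-- ===== PORT B =====
def tubeRound_alt (num : Int) : Int :=
  PySem.Int.mod (PySem.Int.floordiv (max 0 num) 12) 96 + 1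

-- ===== PRECONDITION & SPEC =====
def Spec_tubeRound (num : Int) (out : Int) : Prop := out = tubeRound_alt num
instance (num : Int) (out : Int) : Decidable (Spec_tubeRound num out) := by unfold Spec_tubeRound; infer_instance

-- ===== CLAIM (what is proved, stated in full; the proofs are below) =====
def Claim_equal_tubeRound : Prop := ∀ (num : Int), Dom_tubeRound num → Spec_tubeRound num (tubeRound num)

-- ===== LEMMAS AND PROOFS =====

-- the loop over range(0, n) computes exactly the closed form
theorem tubeRound_loop (n : Nat) :
    (PySem.List.pyRange 0 (n : Int) 1).foldl tubeRoundStep 1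
      = ((n / 12 % 96 : Nat) : Int) + 1 := by
  induction n with
  | zero => simp [PySem.List.pyRange_one_eq_nil]
  | succ n ih =>
    have h : (0 : Int) ≤ (n : Int) := Int.natCast_nonneg n
    have : ((n : Int) + 1) = (((n + 1 : Nat) : Int)) := by push_cast; ring
    rw [← this, PySem.List.pyRange_one_succ_right h, List.foldl_append, ih]
    simp only [List.foldl_cons, List.foldl_nil, tubeRoundStep]
    have hm : PySem.Int.mod (n : Int) 12 = ((n % 12 : Nat) : Int) := by
      rw [PySem.Int.mod, Int.fmod_eq_emod]
      omega
    rw [hm]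
    by_cases h11 : n % 12 = 11
    · have hx : PySem.Int.mod (((n % 12 : Nat) : Int) + 1) 12 = 0 := by
        rw [h11]; decide
      rw [if_pos hx]
      by_cases h95 : n / 12 % 96 = 95
      · rw [if_pos (by rw [h95]; decide)]
        have : (n + 1) / 12 % 96 = 0 := by omega
        rw [this]; decide
      · rw [if_neg (by intro hc; apply h95; omega)]
        have : (n + 1) / 12 % 96 = n / 12 % 96 + 1 := by omega
        rw [this]; push_cast; ring
    · have hx : PySem.Int.mod (((n % 12 : Nat) : Int) + 1) 12 ≠ 0 := by
        rw [PySem.Int.mod, Int.fmod_eq_emod]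
        omega
      rw [if_neg hx]
      have : (n + 1) / 12 = n / 12 := by omega
      rw [this]

-- ===== VERDICT (by name: the statement is the Claim_ definition above) =====
theorem tubeRound_spec : Claim_equal_tubeRound := by
  intro num _
  unfold Spec_tubeRound tubeRound tubeRound_alt
  by_cases h : num ≤ 0
  · have hmax : max 0 num = 0 := by omega
    rw [PySem.List.pyRange_one_eq_nil h, hmax]
    simp [PySem.Int.floordiv, PySem.Int.mod]
  · have hn : num = (num.toNat : Int) := by omega
    have hmax : max 0 num = num := by omega
    rw [hn] at hmax
    rw [hn, tubeRound_loop, hmax]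
    unfold PySem.Int.floordiv PySem.Int.mod
    rw [Int.fdiv_eq_ediv, Int.fmod_eq_emod]
    simp
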